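-- pv_equiv track=rewrite | github.com/MubarakSec/moocif-python-grind | part4-functions/11_first_second_last.py | second_word
-- ===== SOURCE A (Python) =====
-- def second_word(y):
--     i = 0
--     n = len(y)
--     while i < n and y[i] != ' ':
--         i += 1
--     i += 1
--
--     word = ""
--     while i < n and y[i] != ' ':
--         word += y[i]
--         i += 1
--
--     return word
-- ===== SOURCE B (Python) =====
-- def second_word(y):
--     parts = y.split(' ')
--     return parts[1] if len(parts) >= 2 else ""
-- ===== Notes on version B (the rewrite author's own statement) =====
-- stated objective: idiomatic
-- what changed: Replaces the two manual character-by-character scanning while loops with a single str.split on the explicit single-space delimiter, building the token list and selecting the second token (guarded for the one-token case).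
import Mathlib
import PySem

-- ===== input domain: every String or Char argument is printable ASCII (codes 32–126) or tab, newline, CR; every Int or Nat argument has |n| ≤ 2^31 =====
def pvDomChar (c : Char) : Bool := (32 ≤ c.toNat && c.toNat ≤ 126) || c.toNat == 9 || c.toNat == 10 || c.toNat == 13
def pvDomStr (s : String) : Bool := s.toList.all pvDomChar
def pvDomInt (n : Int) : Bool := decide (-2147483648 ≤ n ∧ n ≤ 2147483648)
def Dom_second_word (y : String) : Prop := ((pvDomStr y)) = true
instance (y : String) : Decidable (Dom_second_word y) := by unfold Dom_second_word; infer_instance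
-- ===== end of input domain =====

-- B replaces A's two manual index-scanning loops by split-on-single-space then select the second token (idiomatic; same cost).


-- ===== PORT A =====
-- first while loop: advance i while i < n and y[i] != ' '; returns the remaining characters from index i
def swSkip : List Char → List Char
  | [] => []
  | c :: t => if c ≠ ' ' then swSkip t else c :: t

-- second while loop: word += y[i] while i < n and y[i] != ' '
def swCollect : List Char → List Char → List Char
  | [], word => word
  | c :: t, word => if c ≠ ' ' then swCollect t (word ++ [c]) else word

def second_word (y : String) : String :=
  -- i += 1 after the first loop is the `.drop 1`
  String.mk (swCollect ((swSkip y.toList).drop 1) [])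

-- ===== PORT B =====
def second_word_alt (y : String) : String :=
  let parts := PySem.Chars.splitOn y.toList [' ']   -- y.split(' ')
  if 2 ≤ parts.length then String.mk (parts.getD 1 []) else ""

-- ===== PRECONDITION & SPEC =====
def Spec_second_word (y : String) (out : String) : Prop := out = second_word_alt y
instance (y : String) (out : String) : Decidable (Spec_second_word y out) := by unfold Spec_second_word; infer_instance

-- ===== CLAIM (what is proved, stated in full; the proofs are below) =====
def Claim_equal_second_word : Prop := ∀ (y : String), Dom_second_word y → Spec_second_word y (second_word y)

-- ===== LEMMAS AND PROOFS =====

-- cons-style recurrence for splitting on a single space (proof-side model of splitOn)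
def split1 : List Char → List (List Char)
  | [] => [[]]
  | c :: t => if c = ' ' then [] :: split1 t else (split1 t).modifyHead (c :: ·)

lemma split1_ne_nil (l : List Char) : split1 l ≠ [] := by
  cases l with
  | nil => simp [split1]
  | cons c t =>
    simp only [split1]
    split_ifs <;> simp [List.modifyHead_eq_nil_iff, split1_ne_nil t]

lemma go_eq (l : List Char) : ∀ (fuel : Nat) (cur : List Char) (acc : List (List Char)),
    l.length ≤ fuel →
    PySem.Chars.splitOn.go [' '] fuel l cur acc
      = acc.reverse ++ (split1 l).modifyHead (cur.reverse ++ ·) := by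
  induction l with
  | nil =>
    intro fuel cur acc _
    cases fuel <;> simp [PySem.Chars.splitOn.go, split1]
  | cons c t ih =>
    intro fuel cur acc h
    cases fuel with
    | zero => simp at h
    | succ f =>
      simp only [PySem.Chars.splitOn.go, List.isPrefixOf]
      by_cases hc : c = ' '
      · subst hc
        simp only [split1, if_pos rfl]
        rw [if_pos (by simp), List.length_singleton, List.drop_one, List.tail_cons,
            ih f [] (List.reverse cur :: acc) (by simpa using h)]
        cases ht : split1 t with
        | nil => exact absurd ht (split1_ne_nil t)
        | cons a b => simp
      · rw [if_neg (by simp [hc, Ne.symm hc]), ih f (c :: cur) acc (by simpa using Nat.le_of_succ_le_succ h)]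
        simp only [split1, if_neg hc]
        cases ht : split1 t with
        | nil => exact absurd ht (split1_ne_nil t)
        | cons a b => simp [List.modifyHead]
  termination_by l.length

lemma splitOn_eq_split1 (cs : List Char) :
    PySem.Chars.splitOn cs [' '] = split1 cs := by
  rw [show PySem.Chars.splitOn cs [' '] = PySem.Chars.splitOn.go [' '] (cs.length + 1) cs [] [] from rfl,
      go_eq cs (cs.length + 1) [] [] (by omega)]
  cases h : split1 cs with
  | nil => exact absurd h (split1_ne_nil cs)
  | cons a b => simp [List.modifyHead]

lemma swCollect_acc (l : List Char) : ∀ w, swCollect l w = w ++ swCollect l [] := by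
  induction l with
  | nil => intro w; simp [swCollect]
  | cons c t ih =>
    intro w
    simp only [swCollect]
    split_ifs with h
    · rw [ih (w ++ [c]), ih ([] ++ [c])]; simp
    · simp

lemma split1_head (t : List Char) : (split1 t).getD 0 [] = swCollect t [] := by
  induction t with
  | nil => simp [split1, swCollect]
  | cons c t ih =>
    by_cases hc : c = ' '
    · subst hc; simp [split1, swCollect]
    · simp only [split1, if_neg hc, swCollect, if_pos hc]
      rw [swCollect_acc t ([] ++ [c])]
      cases ht : split1 t with
      | nil => exact absurd ht (split1_ne_nil t)
      | cons a b =>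
        simp only [List.modifyHead, List.getD_cons_zero]
        rw [← ih, ht]; simp

lemma main_list (cs : List Char) :
    swCollect ((swSkip cs).drop 1) []
      = if 2 ≤ (split1 cs).length then (split1 cs).getD 1 [] else [] := by
  induction cs with
  | nil => simp [swSkip, split1, swCollect]
  | cons c t ih =>
    by_cases hc : c = ' '
    · subst hc
      simp only [swSkip, if_neg (by decide : ¬(' ' ≠ ' ')), split1, if_true, List.drop_one, List.tail_cons]
      have hlen : 2 ≤ ([] :: split1 t).length := by
        cases ht : split1 t with
        | nil => exact absurd ht (split1_ne_nil t)
        | cons a b => simp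
      rw [if_pos hlen]
      simp only [List.getD_cons_succ]
      exact (split1_head t).symm
    · simp only [swSkip, if_pos hc, split1, if_neg hc, List.length_modifyHead]
      rw [ih]
      congr 1
      cases ht : split1 t with
      | nil => exact absurd ht (split1_ne_nil t)
      | cons a b => simp [List.modifyHead]

-- ===== VERDICT (by name: the statement is the Claim_ definition above) =====
theorem second_word_spec : Claim_equal_second_word := by
  intro y _
  unfold Spec_second_word second_word second_word_alt
  rw [splitOn_eq_split1, main_list]
  by_cases h : 2 ≤ (split1 y.toList).length
  · simp only [if_pos h]
  · simp only [if_neg h]; rfl
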